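-- pv_equiv track=rewrite | github.com/marionoro/CSCI-1133 | exam2/othello.py | tokencount
-- ===== SOURCE A (Python) =====
-- def tokencount(board):
--     blackcount = 0
--     whitecount = 0
--     for x in range(len(board)):
--         for y in range(len(board)):
--             if board[x][y] == 1:
--                 blackcount += 1
--             elif board[x][y] == 2:
--                 whitecount += 1
--     return(blackcount, whitecount)
-- ===== SOURCE B (Python) =====
-- def tokencount(board):
--     n = len(board)
--     cells = [board[x][y] for x in range(n) for y in range(n)]
--     return (cells.count(1), cells.count(2))
-- ===== Notes on version B (the rewrite author's own statement) =====
-- stated objective: simpler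
-- what changed: Replaces the single pass with two running accumulators by first flattening the n-by-n scan into one list of cells and then returning the two list.count results; Pre_ excludes boards with a row shorter than the number of rows, on which A raises IndexError.
import Mathlib
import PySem

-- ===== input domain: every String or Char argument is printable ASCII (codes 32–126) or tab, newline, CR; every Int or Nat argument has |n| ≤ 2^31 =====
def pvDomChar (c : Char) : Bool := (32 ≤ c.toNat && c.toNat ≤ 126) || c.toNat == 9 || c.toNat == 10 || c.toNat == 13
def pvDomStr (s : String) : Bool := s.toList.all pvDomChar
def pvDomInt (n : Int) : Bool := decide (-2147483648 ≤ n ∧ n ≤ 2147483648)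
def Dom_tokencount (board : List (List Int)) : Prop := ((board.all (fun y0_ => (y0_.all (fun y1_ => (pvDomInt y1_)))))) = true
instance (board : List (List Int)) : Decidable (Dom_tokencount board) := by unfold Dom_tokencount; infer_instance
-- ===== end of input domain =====

-- B flattens the n-by-n scan into one list of cells and returns the two list.count results,
-- instead of A's single pass with two running accumulators; Pre_ excludes boards with a row
-- shorter than the number of rows, on which A raises IndexError.


-- the cell board[x][y]; totalized with default 0: inside Pre_ every lookup is in range, so this is exact
def tcCell (board : List (List Int)) (x y : Int) : Int :=
  ((PySem.List.pyGet? board x).bind (fun r => PySem.List.pyGet? r y)).getD 0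

-- ===== PORT A =====
def tokencount (board : List (List Int)) : Int × Int :=
  let bw :=
    (PySem.List.pyRange 0 (board.length : Int) 1).foldl (fun bw x =>
      (PySem.List.pyRange 0 (board.length : Int) 1).foldl (fun bw y =>
        if tcCell board x y = 1 then (bw.1 + 1, bw.2)
        else if tcCell board x y = 2 then (bw.1, bw.2 + 1)
        else bw) bw) ((0 : Int), (0 : Int))
  bw

-- ===== PORT B =====
def tokencount_alt (board : List (List Int)) : Int × Int :=
  let n := (board.length : Int)
  let cells := (PySem.List.pyRange 0 n 1).flatMap (fun x =>
    (PySem.List.pyRange 0 n 1).map (fun y => tcCell board x y))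
  ((cells.count 1 : Int), (cells.count 2 : Int))

-- ===== PRECONDITION & SPEC =====
-- Pre_ excludes exactly the boards on which A raises IndexError: some row shorter than the number of rows
def Pre_tokencount (board : List (List Int)) : Prop :=
  ∀ r ∈ board, board.length ≤ r.length
instance (board : List (List Int)) : Decidable (Pre_tokencount board) := by unfold Pre_tokencount; infer_instance
def pvWitness_tokencount : List (List Int) := [[1, 2], [0, 1]]
def Spec_tokencount (board : List (List Int)) (out : Int × Int) : Prop := out = tokencount_alt board
instance (board : List (List Int)) (out : Int × Int) : Decidable (Spec_tokencount board out) := by unfold Spec_tokencount; infer_instance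

-- ===== CLAIM (what is proved, stated in full; the proofs are below) =====
def Claim_equal_tokencount : Prop := ∀ (board : List (List Int)), Dom_tokencount board → Pre_tokencount board → Spec_tokencount board (tokencount board)

-- ===== LEMMAS AND PROOFS =====

-- one pass with two accumulators over the cells g y, y in L = the two counts of the mapped list
theorem foldl_two_counts (g : Int → Int) (L : List Int) (b w : Int) :
    L.foldl (fun bw y =>
      if g y = 1 then (bw.1 + 1, bw.2)
      else if g y = 2 then (bw.1, bw.2 + 1)
      else bw) (b, w) = (b + ((L.map g).count 1 : Int), w + ((L.map g).count 2 : Int)) := by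
  induction L generalizing b w with
  | nil => simp
  | cons v t ih =>
    simp only [List.foldl_cons, List.map_cons, List.count_cons]
    by_cases h1 : g v = 1
    · rw [if_pos h1, ih]; simp [h1, Prod.ext_iff]; omega
    · by_cases h2 : g v = 2
      · rw [if_neg h1, if_pos h2, ih]; simp [h2, Prod.ext_iff]; omega
      · rw [if_neg h1, if_neg h2, ih]; simp [h1, h2]

-- nested index fold with two accumulators = counts over the flattened cell list
theorem nested_counts (f : Int → Int → Int) (xs ys : List Int) (b w : Int) :
    xs.foldl (fun bw x => ys.foldl (fun bw y =>
      if f x y = 1 then (bw.1 + 1, bw.2)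
      else if f x y = 2 then (bw.1, bw.2 + 1)
      else bw) bw) (b, w)
    = (b + ((xs.flatMap (fun x => ys.map (f x))).count 1 : Int),
       w + ((xs.flatMap (fun x => ys.map (f x))).count 2 : Int)) := by
  induction xs generalizing b w with
  | nil => simp
  | cons x t ih =>
    simp only [List.foldl_cons, List.flatMap_cons, List.count_append]
    rw [foldl_two_counts, ih]
    simp [Prod.ext_iff]
    omega

-- ===== VERDICT (by name: the statement is the Claim_ definition above) =====
theorem tokencount_spec : Claim_equal_tokencount := by
  intro board _ _
  unfold Spec_tokencount tokencount tokencount_alt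
  dsimp only
  rw [nested_counts (tcCell board)]
  simp
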